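-- pv_equiv track=rewrite | github.com/saini1998/TopCodingQuestionsGeeksforGeeks | specialKeyboard.py | optimalKeys
-- ===== SOURCE A (Python) =====
-- def optimalKeys(N):
--         if (N <= 6):
--             return N
--
--         screen = [0]*N
--
--         for n in range(1, 7):
--             screen[n-1] = n
--
--         for n in range(7, N + 1):
--
--             screen[n-1] = 0
--
--             for b in range(n-3, 0, -1):
--                 b_value = n - 3
--                 curr_term_1 = n - b - 1
--                 b_minus_one = b - 1
--                 curr = (n-b-1)*screen[b-1]
--                 screen_n_minus_one = screen[n-1]
--                 if (curr > screen[n-1]):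
--                     screen[n-1] = curr
--
--         ans = screen[N-1]
--
--         return screen[N-1]
-- ===== SOURCE B (Python) =====
-- def optimalKeys(N):
--     if N <= 6:
--         return N
--     # dp over a rolling window of the last six values; for n >= 7 the optimal
--     # break point lies in {n-3, n-4, n-5, n-6}, so only four candidates are checked.
--     a, b, c, d, e, f = 1, 2, 3, 4, 5, 6
--     for _ in range(7, N + 1):
--         a, b, c, d, e, f = b, c, d, e, f, max(2 * d, 3 * c, 4 * b, 5 * a)
--     return f
-- ===== Notes on version B (the rewrite author's own statement) =====
-- stated objective: faster
-- what changed: Replaced the O(N^2) DP that scans all break points b in [1, n-3] (over a full screen array) with an O(N) rolling-window DP that checks only the four candidates b in {n-3,n-4,n-5,n-6}, proved sufficient because shifting a break point by +3 never decreases the product.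
import Mathlib
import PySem

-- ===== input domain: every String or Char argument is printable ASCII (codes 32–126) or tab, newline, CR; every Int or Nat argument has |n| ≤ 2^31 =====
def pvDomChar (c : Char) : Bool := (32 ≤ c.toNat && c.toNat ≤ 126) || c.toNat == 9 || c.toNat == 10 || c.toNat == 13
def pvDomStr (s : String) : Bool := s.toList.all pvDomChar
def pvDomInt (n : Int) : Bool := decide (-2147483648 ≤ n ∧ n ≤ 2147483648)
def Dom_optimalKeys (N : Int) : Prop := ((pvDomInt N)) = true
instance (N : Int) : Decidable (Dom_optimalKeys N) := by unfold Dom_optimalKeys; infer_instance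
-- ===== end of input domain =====

-- B replaces A's quadratic all-break-points DP by a linear rolling-window DP checking only break points {n-3,n-4,n-5,n-6}.

-- ===== PORT A =====
def innerStepA (n : Int) (screen : List Int) (b : Int) : List Int :=
  let curr := (n - b - 1) * PySem.List.pyGetD screen (b - 1) 0
  if curr > PySem.List.pyGetD screen (n - 1) 0 then PySem.List.pySetD screen (n - 1) curr
  else screen

def outerStepA (screen : List Int) (n : Int) : List Int :=
  let screen := PySem.List.pySetD screen (n - 1) 0
  (PySem.List.pyRange (n - 3) 0 (-1)).foldl (innerStepA n) screen

def optimalKeys (N : Int) : Int :=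
  if N ≤ 6 then N
  else
    -- screen = [0]*N  (exact: this branch has N ≥ 7)
    let screen : List Int := List.replicate N.toNat 0
    let screen := (PySem.List.pyRange 1 7 1).foldl
      (fun s n => PySem.List.pySetD s (n - 1) n) screen
    let screen := (PySem.List.pyRange 7 (N + 1) 1).foldl outerStepA screen
    PySem.List.pyGetD screen (N - 1) 0

-- ===== PORT B =====
def bStepB (s : Int × Int × Int × Int × Int × Int) (_ : Int) :
    Int × Int × Int × Int × Int × Int :=
  match s with
  | (a, b, c, d, e, f) => (b, c, d, e, f, max (max (max (2 * d) (3 * c)) (4 * b)) (5 * a))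

def optimalKeys_alt (N : Int) : Int :=
  if N ≤ 6 then N
  else
    let s := (PySem.List.pyRange 7 (N + 1) 1).foldl bStepB (1, 2, 3, 4, 5, 6)
    s.2.2.2.2.2

-- ===== PRECONDITION & SPEC =====
def Spec_optimalKeys (N : Int) (out : Int) : Prop := out = optimalKeys_alt N
instance (N : Int) (out : Int) : Decidable (Spec_optimalKeys N out) := by unfold Spec_optimalKeys; infer_instance

-- ===== CLAIM (what is proved, stated in full; the proofs are below) =====
def Claim_equal_optimalKeys : Prop := ∀ (N : Int), Dom_optimalKeys N → Spec_optimalKeys N (optimalKeys N)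

-- ===== LEMMAS AND PROOFS =====

-- the mathematical dp value (1-indexed), with the four-candidate recurrence
def g (n : Nat) : Int :=
  if n ≤ 6 then (n : Int)
  else max (max (max (2 * g (n - 3)) (3 * g (n - 4))) (4 * g (n - 5))) (5 * g (n - 6))
termination_by n
decreasing_by all_goals omega

lemma g_small {n : Nat} (h : n ≤ 6) : g n = (n : Int) := by
  rw [g]; simp [h]

lemma g_big {n : Nat} (h : 7 ≤ n) : g n =
    max (max (max (2 * g (n - 3)) (3 * g (n - 4))) (4 * g (n - 5))) (5 * g (n - 6)) := by
  rw [g]; simp [show ¬ n ≤ 6 by omega]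

-- g n ≥ n (hence nonnegative)
lemma g_ge (n : Nat) : (n : Int) ≤ g n := by
  induction n using Nat.strong_induction_on with
  | _ n ih =>
    by_cases h : n ≤ 6
    · rw [g_small h]
    · rw [g_big (by omega)]
      have h3 := ih (n - 3) (by omega)
      have hc : ((n - 3 : Nat) : Int) = (n : Int) - 3 := by omega
      rw [hc] at h3
      have : ((n : Int)) ≤ 2 * g (n - 3) := by nlinarith
      exact le_trans this
        (le_max_of_le_left (le_max_of_le_left (le_max_left _ _)))

lemma g_nonneg (n : Nat) : 0 ≤ g n := le_trans (by positivity) (g_ge n)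

-- doubling step: g (b+3) ≥ 2 * g b for b ≥ 1
lemma g_double {b : Nat} (hb : 1 ≤ b) : 2 * g b ≤ g (b + 3) := by
  by_cases h : b + 3 ≤ 6
  · rw [g_small (n := b + 3) h, g_small (n := b) (by omega)]
    push_cast; omega
  · rw [g_big (n := b + 3) (by omega)]
    have e : b + 3 - 3 = b := by omega
    rw [e]
    exact le_max_of_le_left (le_max_of_le_left (le_max_left _ _))

-- candidate value for break point b (1-indexed)
def cnd (n b : Nat) : Int := ((n : Int) - b - 1) * g b

-- the four-candidate max IS g n
lemma g_eq_max4 {n : Nat} (h : 7 ≤ n) :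
    g n = max (max (max (cnd n (n - 3)) (cnd n (n - 4))) (cnd n (n - 5))) (cnd n (n - 6)) := by
  rw [g_big h]
  unfold cnd
  have e3 : ((n : Int) - (n - 3 : Nat) - 1) = 2 := by omega
  have e4 : ((n : Int) - (n - 4 : Nat) - 1) = 3 := by omega
  have e5 : ((n : Int) - (n - 5 : Nat) - 1) = 4 := by omega
  have e6 : ((n : Int) - (n - 6 : Nat) - 1) = 5 := by omega
  rw [e3, e4, e5, e6]

-- every in-range candidate is ≤ g n (shifting the break point by +3 never decreases it)
lemma cand_le {n : Nat} (h7 : 7 ≤ n) : ∀ b, 1 ≤ b → b ≤ n - 3 → cnd n b ≤ g n := by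
  have key : ∀ k b, n - b ≤ k → 1 ≤ b → b ≤ n - 3 → cnd n b ≤ g n := by
    intro k
    induction k with
    | zero => intro b hk h1 h2; omega
    | succ k ih =>
      intro b hk h1 h2
      by_cases hbig : n - 6 ≤ b
      · rw [g_eq_max4 h7]
        have : b = n - 3 ∨ b = n - 4 ∨ b = n - 5 ∨ b = n - 6 := by omega
        rcases this with rfl | rfl | rfl | rfl
        · exact le_max_of_le_left (le_max_of_le_left (le_max_left _ _))
        · exact le_max_of_le_left (le_max_of_le_left (le_max_right _ _))
        · exact le_max_of_le_left (le_max_right _ _)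
        · exact le_max_right _ _
      · have hstep : cnd n b ≤ cnd n (b + 3) := by
          unfold cnd
          have hd := g_double h1
          have hg := g_nonneg b
          have hg3 := g_nonneg (b + 3)
          have hc1 : ((b + 3 : Nat) : Int) = (b : Int) + 3 := by push_cast; ring
          rw [hc1]
          have hA : (7 : Int) ≤ (n : Int) - b := by omega
          nlinarith
        exact le_trans hstep (ih (b + 3) (by omega) (by omega) (by omega))
  intro b h1 h2; exact key (n - b) b le_rfl h1 h2

-- the running max-loop is bounded by any bound on its candidates and start
lemma fold_max_le {F : Int → Int} {M : Int} :
    ∀ (l : List Int), (∀ b ∈ l, F b ≤ M) → ∀ acc, acc ≤ M →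
      l.foldl (fun a b => if F b > a then F b else a) acc ≤ M := by
  intro l
  induction l with
  | nil => intro _ acc h; simpa using h
  | cons x t ih =>
    intro hmem acc h
    simp only [List.foldl_cons]
    apply ih (fun b hb => hmem b (List.mem_cons_of_mem _ hb))
    have := hmem x List.mem_cons_self
    split_ifs <;> omega

-- the running max never decreases, and dominates every processed candidate
lemma fold_max_ge {F : Int → Int} :
    ∀ (l : List Int) (acc : Int),
      acc ≤ l.foldl (fun a b => if F b > a then F b else a) acc ∧
      ∀ b ∈ l, F b ≤ l.foldl (fun a b => if F b > a then F b else a) acc := by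
  intro l
  induction l with
  | nil => intro acc; simp
  | cons x t ih =>
    intro acc
    simp only [List.foldl_cons]
    have step : acc ≤ (if F x > acc then F x else acc) ∧
        F x ≤ (if F x > acc then F x else acc) := by
      split_ifs <;> omega
    obtain ⟨ht1, ht2⟩ := ih (if F x > acc then F x else acc)
    refine ⟨le_trans step.1 ht1, ?_⟩
    intro b hb
    rcases List.mem_cons.mp hb with rfl | hb
    · exact le_trans step.2 ht1
    · exact ht2 b hb

-- the idealized screen contents after the outer loop has processed n = 7 .. m
def table (m N : Nat) : List Int :=
  (List.range N).map (fun i => if i + 1 ≤ m then g (i + 1) else 0)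

lemma table_length (m N : Nat) : (table m N).length = N := by simp [table]

lemma table_getD {m N : Nat} {j : Int} (h0 : 0 ≤ j) (hj : j.toNat < N) :
    PySem.List.pyGetD (table m N) j 0 = if j.toNat + 1 ≤ m then g (j.toNat + 1) else 0 := by
  rw [PySem.List.pyGetD_of_nonneg _ _ h0]
  rw [List.getD_eq_getElem?_getD,
    List.getElem?_eq_getElem (by simp [table]; omega)]
  simp [table]

-- the inner loop only rewrites index (n-1), accumulating a running max there
lemma inner_general {n : Int} (hn : 7 ≤ n) (L : List Int) (hL : (n - 1).toNat < L.length) :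
    ∀ (l : List Int), (∀ b ∈ l, 1 ≤ b ∧ b ≤ n - 3) → ∀ acc : Int,
      l.foldl (innerStepA n) (L.set (n - 1).toNat acc) =
      L.set (n - 1).toNat
        (l.foldl (fun a b =>
          if (n - b - 1) * PySem.List.pyGetD L (b - 1) 0 > a
          then (n - b - 1) * PySem.List.pyGetD L (b - 1) 0 else a) acc) := by
  intro l
  induction l with
  | nil => intro _ acc; simp
  | cons x t ih =>
    intro hmem acc
    obtain ⟨hx1, hx2⟩ := hmem x List.mem_cons_self
    simp only [List.foldl_cons]
    have hread : PySem.List.pyGetD (L.set (n - 1).toNat acc) (x - 1) 0 =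
        PySem.List.pyGetD L (x - 1) 0 := by
      rw [PySem.List.pyGetD_of_nonneg _ _ (by omega),
        PySem.List.pyGetD_of_nonneg _ _ (by omega)]
      rw [List.getD_eq_getElem?_getD, List.getD_eq_getElem?_getD,
        List.getElem?_set_ne (by omega)]
    have hself : PySem.List.pyGetD (L.set (n - 1).toNat acc) (n - 1) 0 = acc := by
      rw [PySem.List.pyGetD_of_nonneg _ _ (by omega)]
      rw [List.getD_eq_getElem?_getD, List.getElem?_set_self (by simpa using hL)]
      rfl
    have hstep : innerStepA n (L.set (n - 1).toNat acc) x =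
        L.set (n - 1).toNat
          (if (n - x - 1) * PySem.List.pyGetD L (x - 1) 0 > acc
           then (n - x - 1) * PySem.List.pyGetD L (x - 1) 0 else acc) := by
      simp only [innerStepA]
      rw [hread, hself]
      split_ifs with h
      · rw [PySem.List.pySetD_of_nonneg _ _ (by omega), List.set_set]
      · rfl
    rw [hstep, ih (fun b hb => hmem b (List.mem_cons_of_mem _ hb))]

-- one outer-loop step turns table (n-1) into table n
lemma outer_step {n N : Nat} (h7 : 7 ≤ n) (hN : n ≤ N) :
    outerStepA (table (n - 1) N) (n : Int) = table n N := by
  simp only [outerStepA]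
  have hi : ((n : Int) - 1).toNat = n - 1 := by omega
  have hlen : ((n : Int) - 1).toNat < (table (n - 1) N).length := by
    rw [hi, table_length]; omega
  rw [PySem.List.pySetD_of_nonneg _ _ (by omega : (0:Int) ≤ (n : Int) - 1)]
  rw [inner_general (by omega : (7:Int) ≤ (n : Int)) _ hlen _
    (fun b hb => by
      have := (PySem.List.mem_pyRange_neg_one).mp hb
      constructor <;> omega) 0]
  have hcand : ∀ b ∈ PySem.List.pyRange ((n : Int) - 3) 0 (-1),
      PySem.List.pyGetD (table (n - 1) N) (b - 1) 0 = g b.toNat := by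
    intro b hb
    have hbr := (PySem.List.mem_pyRange_neg_one).mp hb
    rw [table_getD (by omega) (by omega)]
    have e : (b - 1).toNat + 1 = b.toNat := by omega
    rw [e]
    simp [show b.toNat ≤ n - 1 by omega]
  have hfold :
      (PySem.List.pyRange ((n : Int) - 3) 0 (-1)).foldl
        (fun a b => if (↑n - b - 1) * PySem.List.pyGetD (table (n - 1) N) (b - 1) 0 > a
          then (↑n - b - 1) * PySem.List.pyGetD (table (n - 1) N) (b - 1) 0 else a) 0 =
      (PySem.List.pyRange ((n : Int) - 3) 0 (-1)).foldl
        (fun a b => if (↑n - b - 1) * g b.toNat > a then (↑n - b - 1) * g b.toNat else a) 0 :=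
    PySem.List.foldl_congr_mem _ _ _ _ (fun acc b hb => by rw [hcand b hb])
  rw [hfold]
  have hmaxval :
      (PySem.List.pyRange ((n : Int) - 3) 0 (-1)).foldl
        (fun a b => if (↑n - b - 1) * g b.toNat > a then (↑n - b - 1) * g b.toNat else a) 0 =
      g n := by
    apply le_antisymm
    · apply fold_max_le (F := fun b => ((n : Int) - b - 1) * g b.toNat) _ _ _
        (le_trans (by positivity) (g_ge n))
      intro b hb
      have hbr := (PySem.List.mem_pyRange_neg_one).mp hb
      have e : (b : Int) = ((b.toNat : Nat) : Int) := by omega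
      have hcb := cand_le h7 b.toNat (by omega) (by omega)
      unfold cnd at hcb
      show ((n : Int) - b - 1) * g b.toNat ≤ g n
      calc ((n : Int) - b - 1) * g b.toNat
          = ((n : Int) - (b.toNat : Int) - 1) * g b.toNat := by congr 1; omega
        _ ≤ g n := hcb
    · obtain ⟨-, hall⟩ :=
        fold_max_ge (F := fun b => ((n : Int) - b - 1) * g b.toNat)
          (PySem.List.pyRange ((n : Int) - 3) 0 (-1)) 0
      have hc : ∀ k : Nat, 3 ≤ k → k ≤ 6 →
          cnd n (n - k) ≤ (PySem.List.pyRange ((n : Int) - 3) 0 (-1)).foldl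
            (fun a b => if (↑n - b - 1) * g b.toNat > a then (↑n - b - 1) * g b.toNat else a) 0 := by
        intro k h3 h6
        have hmem : ((n : Int) - k) ∈ PySem.List.pyRange ((n : Int) - 3) 0 (-1) := by
          rw [PySem.List.mem_pyRange_neg_one]; constructor <;> omega
        have := hall _ hmem
        have e1 : ((n : Int) - ((n : Int) - k) - 1) * g ((n : Int) - k).toNat = cnd n (n - k) := by
          unfold cnd
          have e2 : ((n : Int) - k).toNat = n - k := by omega
          rw [e2]
          have e3 : ((n : Int) - ((n : Int) - k) - 1) = ((n : Int) - ((n - k : Nat) : Int) - 1) := by omega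
          rw [e3]
        rw [e1] at this
        exact this
      rw [g_eq_max4 h7]
      exact max_le (max_le (max_le (hc 3 (by omega) (by omega)) (hc 4 (by omega) (by omega)))
        (hc 5 (by omega) (by omega))) (hc 6 (by omega) (by omega))
  rw [hmaxval]
  apply List.ext_getElem
  · simp [table_length]
  · intro i h1 h2
    rw [List.getElem_set]
    simp only [table_length] at h1 h2
    simp only [table, List.getElem_map, List.getElem_range]
    rw [hi]
    by_cases hie : n - 1 = i
    · simp [hie, show i + 1 = n by omega]
    · simp only [if_neg hie]
      by_cases hfst : i + 1 ≤ n - 1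
      · simp [hfst, show i + 1 ≤ n by omega]
      · simp [hfst, show ¬ (i + 1 ≤ n) by omega]

-- the first initialisation loop produces table 6
lemma init_table {n : Nat} (_h7 : 7 ≤ n) :
    (PySem.List.pyRange 1 7 1).foldl (fun s k => PySem.List.pySetD s (k - 1) k)
      (List.replicate n 0) = table 6 n := by
  have hr : PySem.List.pyRange 1 7 1 = [1, 2, 3, 4, 5, 6] := by decide
  rw [hr]
  simp only [List.foldl_cons, List.foldl_nil]
  norm_num [PySem.List.pySetD_of_nonneg]
  apply List.ext_getElem
  · simp [table_length]
  · intro i hh1 hh2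
    simp only [List.getElem_set, List.getElem_replicate]
    simp only [table, List.getElem_map, List.getElem_range]
    simp only [table_length] at hh2
    by_cases h6 : i + 1 ≤ 6
    · have hub : i ≤ 5 := by omega
      interval_cases i <;> norm_num [g_small, show Int.toNat 2 = 2 from rfl,
        show Int.toNat 3 = 3 from rfl, show Int.toNat 4 = 4 from rfl, show Int.toNat 5 = 5 from rfl]
    · simp [show Int.toNat 2 = 2 from rfl, show Int.toNat 3 = 3 from rfl,
        show Int.toNat 4 = 4 from rfl, show Int.toNat 5 = 5 from rfl,
        show ¬ (5 = i) by omega, show ¬ (4 = i) by omega, show ¬ (3 = i) by omega,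
        show ¬ (2 = i) by omega, show ¬ (1 = i) by omega, show ¬ (0 = i) by omega, h6]

-- the whole outer loop fills the table up to m
lemma outer_inv {n : Nat} (_h7n : 7 ≤ n) : ∀ m : Nat, 6 ≤ m → m ≤ n →
    (PySem.List.pyRange 7 ((m : Int) + 1) 1).foldl outerStepA (table 6 n) = table m n := by
  intro m
  induction m with
  | zero => omega
  | succ m ih =>
    intro h6 hm
    by_cases hm6 : 6 ≤ m
    · have e : ((m + 1 : Nat) : Int) + 1 = ((m : Int) + 1) + 1 := by push_cast; ring
      rw [e, PySem.List.pyRange_one_succ_right (by omega), List.foldl_append, ih hm6 (by omega)]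
      simp only [List.foldl_cons, List.foldl_nil]
      have h := outer_step (n := m + 1) (N := n) (by omega) (by omega)
      rw [Nat.add_sub_cancel] at h
      rw [show ((m : Int) + 1) = ((m + 1 : Nat) : Int) by push_cast; ring]
      exact h
    · have hm5 : m = 5 := by omega
      subst hm5
      rw [show ((6 : Nat) : Int) + 1 = 7 by norm_num,
        PySem.List.pyRange_one_eq_nil (by norm_num), List.foldl_nil]

-- B-side: the rolling window carries the last six dp values
lemma b_inv : ∀ m : Nat, 6 ≤ m →
    (PySem.List.pyRange 7 ((m : Int) + 1) 1).foldl bStepB (1, 2, 3, 4, 5, 6) =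
      (g (m - 5), g (m - 4), g (m - 3), g (m - 2), g (m - 1), g m) := by
  intro m
  induction m with
  | zero => omega
  | succ m ih =>
    intro h6
    by_cases hm6 : 6 ≤ m
    · have e : ((m + 1 : Nat) : Int) + 1 = ((m : Int) + 1) + 1 := by push_cast; ring
      rw [e, PySem.List.pyRange_one_succ_right (by omega), List.foldl_append, ih hm6]
      simp only [List.foldl_cons, List.foldl_nil, bStepB]
      have hg : g (m + 1) =
          max (max (max (2 * g (m - 2)) (3 * g (m - 3))) (4 * g (m - 4))) (5 * g (m - 5)) := by
        rw [g_big (n := m + 1) (by omega)]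
        rw [show m + 1 - 3 = m - 2 by omega, show m + 1 - 4 = m - 3 by omega,
          show m + 1 - 5 = m - 4 by omega, show m + 1 - 6 = m - 5 by omega]
      rw [show m + 1 - 5 = m - 4 by omega, show m + 1 - 4 = m - 3 by omega,
        show m + 1 - 3 = m - 2 by omega, show m + 1 - 2 = m - 1 by omega,
        show m + 1 - 1 = m by omega, hg]
    · have hm5 : m = 5 := by omega
      subst hm5
      rw [show ((6 : Nat) : Int) + 1 = 7 by norm_num,
        PySem.List.pyRange_one_eq_nil (by norm_num), List.foldl_nil]
      norm_num [g_small]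

-- ===== VERDICT (by name: the statement is the Claim_ definition above) =====
theorem optimalKeys_spec : Claim_equal_optimalKeys := by
  intro N _
  unfold Spec_optimalKeys optimalKeys optimalKeys_alt
  by_cases hN : N ≤ 6
  · rw [if_pos hN, if_pos hN]
  · rw [if_neg hN, if_neg hN]
    have h7 : 7 ≤ N := by omega
    set n : Nat := N.toNat with hn
    have hcast : ((n : Nat) : Int) = N := by omega
    have h7n : 7 ≤ n := by omega
    rw [← hcast]
    show PySem.List.pyGetD
        ((PySem.List.pyRange 7 ((n : Int) + 1) 1).foldl outerStepA
          ((PySem.List.pyRange 1 7 1).foldl (fun s k => PySem.List.pySetD s (k - 1) k)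
            (List.replicate n 0))) ((n : Int) - 1) 0 =
      ((PySem.List.pyRange 7 ((n : Int) + 1) 1).foldl bStepB (1, 2, 3, 4, 5, 6)).2.2.2.2.2
    rw [init_table h7n, outer_inv h7n n (by omega) le_rfl, b_inv n (by omega)]
    rw [table_getD (by omega) (by omega)]
    simp only [show ((n : Int) - 1).toNat + 1 = n by omega]
    simp
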